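-- pv_equiv track=rewrite | github.com/NeymarL/ChineseChess-AlphaZero | cchess_alphazero/environment/static_env.py | y_board_from
-- ===== SOURCE A (Python) =====
-- BOARD_HEIGHT = 10
--
-- def y_board_from(board, x, y):
--     d = y-1
--     u = y+1
--     while d > -1 and board[d][x] == '.':
--         d = d-1
--     while u < BOARD_HEIGHT and board[u][x] == '.':
--         u = u+1
--     return d, u
-- ===== SOURCE B (Python) =====
-- BOARD_HEIGHT = 10
--
-- def y_board_from(board, x, y):
--     def empty_run(idxs):
--         """How many leading cells of the column slice `idxs` are empty."""
--         if not idxs or board[idxs[0]][x] != '.':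
--             return 0
--         return 1 + empty_run(idxs[1:])
--
--     below = empty_run(range(y - 1, -1, -1))
--     above = empty_run(range(y + 1, BOARD_HEIGHT))
--     return y - 1 - below, y + 1 + above
-- ===== Notes on version B (the rewrite author's own statement) =====
-- stated objective: alternative
-- what changed: Replaces A's two mutable-counter while-walks with a single recursive helper that measures the length of the run of empty cells along each direction's index range; the answers are then recovered arithmetically as start position minus/plus that run length, instead of being the final value of a walked counter.
import Mathlib
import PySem

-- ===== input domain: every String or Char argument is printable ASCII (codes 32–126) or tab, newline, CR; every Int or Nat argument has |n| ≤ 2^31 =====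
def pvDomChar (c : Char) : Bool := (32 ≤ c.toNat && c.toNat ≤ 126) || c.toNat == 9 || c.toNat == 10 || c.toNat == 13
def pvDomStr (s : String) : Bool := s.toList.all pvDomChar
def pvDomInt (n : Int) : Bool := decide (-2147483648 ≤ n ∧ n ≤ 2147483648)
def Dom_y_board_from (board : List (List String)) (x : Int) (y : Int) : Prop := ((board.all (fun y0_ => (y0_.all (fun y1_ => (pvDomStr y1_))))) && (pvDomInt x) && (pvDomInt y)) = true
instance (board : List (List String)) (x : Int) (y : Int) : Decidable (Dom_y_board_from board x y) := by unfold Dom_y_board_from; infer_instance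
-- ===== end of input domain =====

-- B replaces A's two mutable-counter while-walks by one recursive helper measuring the length
-- of the empty run along each direction's index range, recovering the answers arithmetically
-- as start ± run length — objective: alternative (same cost, different decomposition).

-- board[i][x] (Python indexing, negative i/x wrap; none = IndexError, excluded by Pre_)
def pvCell (board : List (List String)) (i x : Int) : Option String :=
  (PySem.List.pyGet? board i).bind (fun row => PySem.List.pyGet? row x)

-- ===== PORT A =====
-- `while d > -1 and board[d][x] == '.': d = d - 1`, fuel-bounded structural recursion
def pvDown (board : List (List String)) (x : Int) : Nat → Int → Int
  | 0, d => d
  | fuel + 1, d =>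
    if d > -1 ∧ pvCell board d x = some "." then pvDown board x fuel (d - 1) else d

-- `while u < BOARD_HEIGHT and board[u][x] == '.': u = u + 1`
def pvUp (board : List (List String)) (x : Int) : Nat → Int → Int
  | 0, u => u
  | fuel + 1, u =>
    if u < 10 ∧ pvCell board u x = some "." then pvUp board x fuel (u + 1) else u

def y_board_from (board : List (List String)) (x : Int) (y : Int) : Int × Int :=
  (pvDown board x (y + 1).toNat (y - 1), pvUp board x (10 - (y + 1)).toNat (y + 1))

-- ===== PORT B =====
-- empty_run(idxs): 0 if the slice is empty or its first cell is occupied, else 1 + recurse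
def pvRun (board : List (List String)) (x : Int) : List Int → Int
  | [] => 0
  | i :: rest => if pvCell board i x ≠ some "." then 0 else 1 + pvRun board x rest

-- below = empty_run(range(y-1, -1, -1)); above = empty_run(range(y+1, BOARD_HEIGHT));
-- return y-1-below, y+1+above
def y_board_from_alt (board : List (List String)) (x : Int) (y : Int) : Int × Int :=
  let below := pvRun board x (PySem.List.pyRange (y - 1) (-1) (-1))
  let above := pvRun board x (PySem.List.pyRange (y + 1) 10 1)
  (y - 1 - below, y + 1 + above)

-- ===== PRECONDITION & SPEC =====
-- Pre_ holds exactly where the Python A (and B, which reads the same cells in the same order)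
-- returns without an IndexError: each walk's first access must not fall off the board
-- (y ≤ len going down, -len ≤ y+1 going up), and on each walk every cell visited before the
-- first non-'.' one, and that cell itself, must be a valid access. (The ranges are clamped to
-- the board, which changes nothing under the two bound conjuncts, so that deciding Pre_ stays
-- cheap for |y| near 2^31.)
def Pre_y_board_from (board : List (List String)) (x : Int) (y : Int) : Prop :=
  y ≤ (board.length : Int) ∧ -(board.length : Int) ≤ y + 1 ∧
  (∀ i ∈ PySem.List.pyRange (min (y - 1) ((board.length : Int) - 1)) (-1) (-1),
    (∀ j ∈ PySem.List.pyRange (min (y - 1) ((board.length : Int) - 1)) i (-1),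
        pvCell board j x = some ".") →
      pvCell board i x ≠ none) ∧
  (∀ i ∈ PySem.List.pyRange (max (y + 1) (-(board.length : Int))) 10 1,
    (∀ j ∈ PySem.List.pyRange (max (y + 1) (-(board.length : Int))) i 1,
        pvCell board j x = some ".") →
      pvCell board i x ≠ none)

instance (board : List (List String)) (x : Int) (y : Int) : Decidable (Pre_y_board_from board x y) := by
  unfold Pre_y_board_from; infer_instance

def pvWitness_y_board_from : List (List String) × Int × Int :=
  ([["r"], ["."], ["."], ["n"], ["."], ["."], ["k"]], 0, 4)

def Spec_y_board_from (board : List (List String)) (x : Int) (y : Int) (out : Int × Int) : Prop := out = y_board_from_alt board x y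
instance (board : List (List String)) (x : Int) (y : Int) (out : Int × Int) : Decidable (Spec_y_board_from board x y out) := by unfold Spec_y_board_from; infer_instance

-- ===== CLAIM (what is proved, stated in full; the proofs are below) =====
def Claim_equal_y_board_from : Prop := ∀ (board : List (List String)) (x : Int) (y : Int), Dom_y_board_from board x y → Pre_y_board_from board x y → Spec_y_board_from board x y (y_board_from board x y)

-- ===== LEMMAS AND PROOFS =====

-- the downward walk lands run-length steps below its start, for any start
theorem pv_down_run (board : List (List String)) (x : Int) :
    ∀ (fuel : Nat) (d : Int), d < (fuel : Int) →
      pvDown board x fuel d = d - pvRun board x (PySem.List.pyRange d (-1) (-1)) := by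
  intro fuel
  induction fuel with
  | zero =>
    intro d hd
    rw [PySem.List.pyRange_neg_one_eq_nil (by omega)]
    simp [pvDown, pvRun]
  | succ f ih =>
    intro d hd
    by_cases h0 : d ≤ -1
    · rw [PySem.List.pyRange_neg_one_eq_nil (by omega)]
      rw [pvDown, if_neg (by rintro ⟨h, _⟩; omega)]
      simp [pvRun]
    · rw [PySem.List.pyRange_neg_one_cons (by omega)]
      by_cases hc : pvCell board d x = some "."
      · rw [pvDown, if_pos ⟨by omega, hc⟩, pvRun, if_neg (by simp [hc]),
          ih (d - 1) (by push_cast at hd ⊢; omega)]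
        ring
      · rw [pvDown, if_neg (by rintro ⟨_, h⟩; exact hc h), pvRun, if_pos hc]
        ring

-- the upward walk lands run-length steps above its start, for any start
theorem pv_up_run (board : List (List String)) (x : Int) :
    ∀ (fuel : Nat) (u : Int), 10 ≤ u + (fuel : Int) →
      pvUp board x fuel u = u + pvRun board x (PySem.List.pyRange u 10 1) := by
  intro fuel
  induction fuel with
  | zero =>
    intro u hu
    rw [PySem.List.pyRange_one_eq_nil (by omega)]
    simp [pvUp, pvRun]
  | succ f ih =>
    intro u hu
    by_cases h0 : 10 ≤ u
    · rw [PySem.List.pyRange_one_eq_nil (by omega)]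
      rw [pvUp, if_neg (by rintro ⟨h, _⟩; omega)]
      simp [pvRun]
    · rw [PySem.List.pyRange_one_cons (by omega)]
      by_cases hc : pvCell board u x = some "."
      · rw [pvUp, if_pos ⟨by omega, hc⟩, pvRun, if_neg (by simp [hc]),
          ih (u + 1) (by push_cast at hu ⊢; omega)]
        ring
      · rw [pvUp, if_neg (by rintro ⟨_, h⟩; exact hc h), pvRun, if_pos hc]
        ring

-- ===== VERDICT (by name: the statement is the Claim_ definition above) =====
theorem y_board_from_spec : Claim_equal_y_board_from := by
  intro board x y _ _
  unfold Spec_y_board_from y_board_from y_board_from_alt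
  rw [Prod.mk.injEq]
  constructor
  · rw [pv_down_run board x (y + 1).toNat (y - 1) (by omega)]
  · rw [pv_up_run board x (10 - (y + 1)).toNat (y + 1) (by omega)]
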